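-- pv_equiv track=rewrite | github.com/lorevox-hx/hornelore | server/code/api/services/question_atomicity.py | _find_first_pivot
-- ===== SOURCE A (Python) =====
-- _PIVOT_TOKENS = (
--     ", and ", ", or ",
--     " and what ", " and how ", " and why ", " and where ", " and when ",
--     " and did ", " and do ", " and does ",
--     " or was ", " or were ", " or did ", " or do ", " or does ",
--     " or is ", " or are ", " or can ", " or could ",
-- )
--
-- def _find_first_pivot(text: str) -> int:
--     """Return the lowercase index of the first pivot token in `text`,
--     or -1 if none found. Used by the truncation step."""
--     lower = text.lower()
--     earliest = -1
--     for tok in _PIVOT_TOKENS: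
--         idx = lower.find(tok)
--         if idx != -1 and (earliest == -1 or idx < earliest):
--             earliest = idx
--     return earliest
-- ===== SOURCE B (Python) =====
-- _PIVOT_TOKENS = (
--     ", and ", ", or ",
--     " and what ", " and how ", " and why ", " and where ", " and when ",
--     " and did ", " and do ", " and does ",
--     " or was ", " or were ", " or did ", " or do ", " or does ",
--     " or is ", " or are ", " or can ", " or could ",
-- )
--
-- def _find_first_pivot(text: str) -> int:
--     """Single left-to-right position scan: return the first index at which
--     any pivot token starts (str.startswith accepts the whole tuple), else -1."""
--     lower = text.lower()
--     for i in range(len(lower)):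
--         if lower.startswith(_PIVOT_TOKENS, i):
--             return i
--     return -1
-- ===== Notes on version B (the rewrite author's own statement) =====
-- stated objective: alternative
-- what changed: Replaces A's token-major loop (str.find per pivot token, keeping the minimum index) with a single position-major left-to-right scan that returns the first index where lower.startswith(_PIVOT_TOKENS, i) holds, exiting early at the first match.
import Mathlib
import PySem

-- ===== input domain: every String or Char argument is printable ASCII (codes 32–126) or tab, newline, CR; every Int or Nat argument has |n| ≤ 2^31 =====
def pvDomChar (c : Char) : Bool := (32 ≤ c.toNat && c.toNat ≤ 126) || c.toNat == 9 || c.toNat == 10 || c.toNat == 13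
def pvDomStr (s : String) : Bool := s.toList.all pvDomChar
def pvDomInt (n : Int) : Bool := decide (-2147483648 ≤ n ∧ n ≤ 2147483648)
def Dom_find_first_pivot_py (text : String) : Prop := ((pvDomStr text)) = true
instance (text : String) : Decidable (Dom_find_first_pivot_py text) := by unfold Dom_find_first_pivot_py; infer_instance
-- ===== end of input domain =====

-- B replaces A's per-token str.find minimum with a single left-to-right position
-- scan that returns the first index where any pivot token starts (alternative
-- decomposition; same return value, no speed claim).


def pivotTokens : List String :=
  [", and ", ", or ",
   " and what ", " and how ", " and why ", " and where ", " and when ",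
   " and did ", " and do ", " and does ",
   " or was ", " or were ", " or did ", " or do ", " or does ",
   " or is ", " or are ", " or can ", " or could "]

-- ===== PORT A =====
def find_first_pivot_py (text : String) : Int :=
  let lower := PySem.Str.lower text
  pivotTokens.foldl
    (fun earliest tok =>
      let idx := PySem.Str.find lower tok
      if idx ≠ -1 ∧ (earliest = -1 ∨ idx < earliest) then idx else earliest)
    (-1)

-- ===== PORT B =====
-- Python's lower.startswith(_PIVOT_TOKENS, i) for 0 ≤ i ≤ len(lower):
-- true iff some token is a prefix of the suffix starting at i (exact here).
def altAny (s : List Char) (i : Nat) : Bool :=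
  pivotTokens.any (fun t => PySem.Chars.startswith (s.drop i) t.toList)

-- the 'for i in range(len(lower))' loop with early return; fuel = remaining iterations
def altGo (s : List Char) (i : Nat) : Nat → Int
  | 0 => -1
  | fuel + 1 => if altAny s i then (i : Int) else altGo s (i + 1) fuel

def find_first_pivot_py_alt (text : String) : Int :=
  let lw := (PySem.Str.lower text).toList
  altGo lw 0 lw.length

-- ===== PRECONDITION & SPEC =====
def Spec_find_first_pivot_py (text : String) (out : Int) : Prop := out = find_first_pivot_py_alt text
instance (text : String) (out : Int) : Decidable (Spec_find_first_pivot_py text out) := by unfold Spec_find_first_pivot_py; infer_instance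

-- ===== CLAIM (what is proved, stated in full; the proofs are below) =====
def Claim_equal_find_first_pivot_py : Prop := ∀ (text : String), Dom_find_first_pivot_py text → Spec_find_first_pivot_py text (find_first_pivot_py text)

-- ===== LEMMAS AND PROOFS =====

-- "some pivot token starts at position i of s"
def AnyTok (s : List Char) (i : Nat) : Prop :=
  ∃ t ∈ pivotTokens, t.toList <+: s.drop i

lemma altAny_iff (s : List Char) (i : Nat) : altAny s i = true ↔ AnyTok s i := by
  simp [altAny, AnyTok, List.any_eq_true, PySem.Chars.startswith_iff]

lemma tokens_ne_nil : ∀ t ∈ pivotTokens, t.toList ≠ [] := by decide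

-- A's fold (over an arbitrary token list, on the list side)
def mFold (s : List Char) (toks : List String) (e : Int) : Int :=
  toks.foldl
    (fun earliest tok =>
      let idx := PySem.Chars.find s tok.toList
      if idx ≠ -1 ∧ (earliest = -1 ∨ idx < earliest) then idx else earliest) e

-- characterization of A's fold: the result is either the accumulator or one of the
-- find values; it is a lower bound for every non-(-1) find value; it never worsens e.
lemma mFold_char (s : List Char) (toks : List String) (e : Int) :
    (mFold s toks e = e ∨ ∃ t ∈ toks, mFold s toks e = PySem.Chars.find s t.toList ∧ mFold s toks e ≠ -1) ∧
    (mFold s toks e = -1 → e = -1 ∧ ∀ t ∈ toks, PySem.Chars.find s t.toList = -1) ∧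
    (∀ t ∈ toks, PySem.Chars.find s t.toList = -1 ∨ (mFold s toks e ≠ -1 ∧ mFold s toks e ≤ PySem.Chars.find s t.toList)) ∧
    (e ≠ -1 → mFold s toks e ≠ -1 ∧ mFold s toks e ≤ e) := by
  induction toks generalizing e with
  | nil => simp [mFold]
  | cons t0 ts ih =>
    have hfind := PySem.Chars.neg_one_le_find s t0.toList
    by_cases hc : PySem.Chars.find s t0.toList ≠ -1 ∧ (e = -1 ∨ PySem.Chars.find s t0.toList < e)
    · have hstep : mFold s (t0 :: ts) e = mFold s ts (PySem.Chars.find s t0.toList) := by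
        simp only [mFold, List.foldl_cons]; rw [if_pos hc]
      obtain ⟨ih1, ih2, ih3, ih4⟩ := ih (PySem.Chars.find s t0.toList)
      refine ⟨?_, ?_, ?_, ?_⟩
      · rcases ih1 with h | ⟨t, ht, h1, h2⟩
        · right; exact ⟨t0, by simp, by rw [hstep, h], by rw [hstep, h]; exact hc.1⟩
        · right; exact ⟨t, by simp [ht], by rw [hstep]; exact h1, by rw [hstep]; exact h2⟩
      · intro h; rw [hstep] at h
        exact absurd (ih4 hc.1).1 (by simp [h])
      · intro t ht
        rcases List.mem_cons.mp ht with rfl | ht'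
        · right
          rw [hstep]
          exact ⟨(ih4 hc.1).1, (ih4 hc.1).2⟩
        · rcases ih3 t ht' with h | h
          · exact Or.inl h
          · right; rw [hstep]; exact h
      · intro he
        rw [hstep]
        rcases hc.2 with rfl | hlt
        · exact absurd rfl he
        · exact ⟨(ih4 hc.1).1, le_trans (ih4 hc.1).2 (le_of_lt hlt)⟩
    · have hstep : mFold s (t0 :: ts) e = mFold s ts e := by
        simp only [mFold, List.foldl_cons]; rw [if_neg hc]
      obtain ⟨ih1, ih2, ih3, ih4⟩ := ih e
      push Not at hc
      refine ⟨?_, ?_, ?_, ?_⟩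
      · rcases ih1 with h | ⟨t, ht, h1, h2⟩
        · left; rw [hstep, h]
        · right; exact ⟨t, by simp [ht], by rw [hstep]; exact h1, by rw [hstep]; exact h2⟩
      · intro h; rw [hstep] at h
        obtain ⟨he, hall⟩ := ih2 h
        refine ⟨he, ?_⟩
        intro t ht
        rcases List.mem_cons.mp ht with rfl | ht'
        · by_contra hne
          obtain ⟨hne0, hlt⟩ := hc hne
          exact hne0 he
        · exact hall t ht'
      · intro t ht
        rcases List.mem_cons.mp ht with rfl | ht'
        · by_cases h0 : PySem.Chars.find s t.toList = -1
          · exact Or.inl h0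
          · right
            obtain ⟨hne0, hle⟩ := hc h0
            have he' : e ≠ -1 := hne0
            rw [hstep]
            exact ⟨(ih4 he').1, le_trans (ih4 he').2 hle⟩
        · rw [hstep]; exact ih3 t ht'
      · intro he; rw [hstep]; exact ih4 he

-- B's loop returns -1 when no position in its remaining window matches
lemma altGo_none (s : List Char) :
    ∀ fuel i, (∀ j, i ≤ j → j < i + fuel → ¬ AnyTok s j) → altGo s i fuel = -1 := by
  intro fuel
  induction fuel with
  | zero => intro i _; rfl
  | succ k ih =>
    intro i h
    have hfalse : altAny s i = false := by
      cases haa : altAny s i with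
      | false => rfl
      | true => exact absurd ((altAny_iff s i).mp haa) (h i le_rfl (by omega))
    simp only [altGo, hfalse, Bool.false_eq_true, if_false]
    exact ih (i + 1) (fun j hj1 hj2 => h j (by omega) (by omega))

-- B's loop returns the first matching position in its window
lemma altGo_found (s : List Char) :
    ∀ fuel i m, i ≤ m → m < i + fuel → AnyTok s m →
      (∀ j, i ≤ j → j < m → ¬ AnyTok s j) → altGo s i fuel = (m : Int) := by
  intro fuel
  induction fuel with
  | zero => intro i m h1 h2; omega
  | succ k ih =>
    intro i m h1 h2 hm hmin
    by_cases hi : i = m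
    · subst hi
      have : altAny s i = true := (altAny_iff s i).mpr hm
      simp [altGo, this]
    · have hlt : i < m := by omega
      have hfalse : altAny s i = false := by
        cases haa : altAny s i with
        | false => rfl
        | true => exact absurd ((altAny_iff s i).mp haa) (hmin i le_rfl hlt)
      simp only [altGo, hfalse, Bool.false_eq_true, if_false]
      exact ih (i + 1) m (by omega) (by omega) hm (fun j hj1 hj2 => hmin j (by omega) hj2)

-- a match anywhere makes the token an infix, so find succeeds
lemma find_ne_of_anyTok (s : List Char) (t : String) (j : Nat)
    (h : t.toList <+: s.drop j) : PySem.Chars.find s t.toList ≠ -1 := by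
  rw [PySem.Chars.find_ne_neg_one_iff, ← PySem.Chars.isIn_iff_infix,
    ← PySem.Chars.exists_prefix_drop_iff_isIn]
  exact ⟨j, h⟩

-- ===== VERDICT (by name: the statement is the Claim_ definition above) =====
theorem find_first_pivot_py_spec : Claim_equal_find_first_pivot_py := by
  intro text _
  unfold Spec_find_first_pivot_py find_first_pivot_py find_first_pivot_py_alt
  set s : List Char := (PySem.Str.lower text).toList with hs
  have hA : pivotTokens.foldl
      (fun earliest tok =>
        let idx := PySem.Str.find (PySem.Str.lower text) tok
        if idx ≠ -1 ∧ (earliest = -1 ∨ idx < earliest) then idx else earliest) (-1)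
      = mFold s pivotTokens (-1) := by
    simp [mFold, PySem.Str.find_eq, hs]
  rw [hA]
  obtain ⟨h1, h2, h3, _⟩ := mFold_char s pivotTokens (-1)
  set r := mFold s pivotTokens (-1) with hr
  by_cases hcase : r = -1
  · -- no token occurs anywhere
    have hall := (h2 hcase).2
    have hnone : ∀ j, 0 ≤ j → j < 0 + s.length → ¬ AnyTok s j := by
      rintro j _ _ ⟨t, ht, hpre⟩
      exact find_ne_of_anyTok s t j hpre (hall t ht)
    rw [altGo_none s s.length 0 hnone, hcase]
  · -- r is a successful find value, minimal over tokens
    rcases h1 with h | ⟨t0, ht0, hreq, _⟩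
    · exact absurd h hcase
    have hfind0 := PySem.Chars.neg_one_le_find s t0.toList
    have hr0 : 0 ≤ r := by rw [hreq] at hcase ⊢; omega
    have hspec := PySem.Chars.find_spec (s := s) (sub := t0.toList) (by rw [← hreq]; exact hr0)
    have hAnym : AnyTok s r.toNat := ⟨t0, ht0, by rw [hreq]; exact hspec.1⟩
    have hmlt : r.toNat < s.length := by
      have hpre0 : t0.toList <+: s.drop r.toNat := by rw [hreq]; exact hspec.1
      by_contra hge
      have hnil : s.drop r.toNat = [] := List.drop_eq_nil_iff.mpr (by omega)
      rw [hnil] at hpre0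
      exact tokens_ne_nil t0 ht0 (List.prefix_nil.mp hpre0)
    have hmin : ∀ j, 0 ≤ j → j < r.toNat → ¬ AnyTok s j := by
      rintro j _ hj ⟨t, ht, hpre⟩
      have hne := find_ne_of_anyTok s t j hpre
      rcases h3 t ht with h | ⟨_, hle⟩
      · exact hne h
      · -- find s t ≥ r, but find's minimality says j ≥ (find s t).toNat
        have hfnn : 0 ≤ PySem.Chars.find s t.toList := le_trans hr0 hle
        have hspec' := PySem.Chars.find_spec (s := s) (sub := t.toList) hfnn
        have : ¬ j < (PySem.Chars.find s t.toList).toNat := fun hlt => hspec'.2 j hlt hpre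
        omega
    have := altGo_found s s.length 0 r.toNat (by omega) (by omega) hAnym hmin
    rw [this]
    omega
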